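-- pv_equiv track=rewrite | github.com/huahuawong/datascience-essentials | 5. DS-prep-resources/2. Data Interview Qs/python_questions.py | last_page_number
-- ===== SOURCE A (Python) =====
-- def last_page_number(string):
--     pos = 0
--     page = 0
--     while pos < len(string):
--         page_str=str(page+1)
--         if string[pos:pos+len(page_str)]==page_str:
--             pos+=len(page_str)
--             page+=1
--         else:
--             break
--     return page
-- ===== SOURCE B (Python) =====
-- def last_page_number(string):
--     n = len(string)
--     ref = ""
--     boundaries = []
--     page = 0
--     while len(ref) < n:
--         page += 1
--         ref += str(page)
--         boundaries.append(len(ref))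
--     i = 0
--     while i < n and ref[i] == string[i]:
--         i += 1
--     return sum(1 for b in boundaries if b <= i)
-- ===== Notes on version B (the rewrite author's own statement) =====
-- stated objective: alternative
-- what changed: Instead of A's loop that repeatedly slices the input and compares it with str(page+1), B builds the concatenated page-number reference string once while recording each page's end boundary, finds the first mismatch index between the reference and the input in a single scan, and returns the number of boundaries inside the matched prefix.
import Mathlib
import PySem

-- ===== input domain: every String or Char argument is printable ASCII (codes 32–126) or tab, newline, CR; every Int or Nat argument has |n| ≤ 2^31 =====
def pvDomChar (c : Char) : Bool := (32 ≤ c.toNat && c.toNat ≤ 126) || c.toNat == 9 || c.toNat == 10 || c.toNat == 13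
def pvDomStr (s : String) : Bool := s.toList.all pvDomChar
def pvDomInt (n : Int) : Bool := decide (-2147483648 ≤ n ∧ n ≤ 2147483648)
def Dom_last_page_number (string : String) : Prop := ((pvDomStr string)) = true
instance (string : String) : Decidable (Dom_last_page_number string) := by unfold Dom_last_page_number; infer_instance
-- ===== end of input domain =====

-- B builds the reference page string '123456…' once (recording each page's end boundary),
-- scans for the first mismatch with the input, and counts boundaries inside the matched
-- prefix — same result as A's repeated slice-compare loop (objective: alternative).

-- termination helper for both ports: str(page) is never the empty string
theorem pv_toDigitsCore_le (b : Nat) : ∀ (fuel n : Nat) (ds : List Char),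
    ds.length ≤ (Nat.toDigitsCore b fuel n ds).length := by
  intro fuel
  induction fuel with
  | zero => intro n ds; simp [Nat.toDigitsCore]
  | succ f ih =>
    intro n ds
    rw [Nat.toDigitsCore]
    by_cases h : n / b = 0
    · simp [h]
    · simp [h]
      calc ds.length ≤ ((n % b).digitChar :: ds).length := by simp
        _ ≤ _ := ih _ _

theorem pv_toChars_len_pos (n : Int) : 0 < (PySem.Int.toChars n).length := by
  have hnn : ∀ (b m : Nat), Nat.toDigits b m ≠ [] := by
    intro b m
    unfold Nat.toDigits
    rw [Nat.toDigitsCore]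
    by_cases h : m / b = 0
    · simp [h]
    · simp [h]
      intro hc
      have := pv_toDigitsCore_le b m (m / b) [(m % b).digitChar]
      rw [hc] at this; simp at this
  unfold PySem.Int.toChars
  split
  · simp
  · have := hnn 10 n.toNat
    cases h : Nat.toDigits 10 n.toNat with
    | nil => exact absurd h this
    | cons a l => simp [h]

-- ===== PORT A =====
def lpnLoopA (s : List Char) (pos : Nat) (page : Int) : Int :=
  if h : pos < s.length then
    let pageStr := PySem.Int.toChars (page + 1)
    if PySem.List.slice s (some (pos : Int)) (some ((pos : Int) + (pageStr.length : Int))) = pageStr then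
      lpnLoopA s (pos + pageStr.length) (page + 1)
    else page
  else page
termination_by s.length - pos
decreasing_by
  have := pv_toChars_len_pos (page + 1)
  omega

def last_page_number (string : String) : Int := lpnLoopA string.toList 0 0

-- ===== PORT B =====
-- the `while len(ref) < n` build loop: returns (ref, boundaries)
def pvBuild (n : Nat) (page : Int) (ref : List Char) (bnds : List Nat) : List Char × List Nat :=
  if h : ref.length < n then
    let page' := page + 1
    let ref' := ref ++ PySem.Int.toChars page'
    pvBuild n page' ref' (bnds ++ [ref'.length])
  else (ref, bnds)
termination_by n - ref.length
decreasing_by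
  have := pv_toChars_len_pos (page + 1)
  simp [ref']
  omega

-- the `while i < n and ref[i] == string[i]` scan loop
def pvScan (s ref : List Char) (i : Nat) : Nat :=
  if h : i < s.length ∧ ref[i]? = s[i]? then pvScan s ref (i + 1) else i
termination_by s.length - i
decreasing_by omega

def last_page_number_alt (string : String) : Int :=
  let s := string.toList
  let rb := pvBuild s.length 0 [] []
  let i := pvScan s rb.1 0
  ((rb.2.countP (fun b => decide (b ≤ i)) : Nat) : Int)

-- ===== PRECONDITION & SPEC =====
def Spec_last_page_number (string : String) (out : Int) : Prop := out = last_page_number_alt string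
instance (string : String) (out : Int) : Decidable (Spec_last_page_number string out) := by unfold Spec_last_page_number; infer_instance

-- ===== CLAIM (what is proved, stated in full; the proofs are below) =====
def Claim_equal_last_page_number : Prop := ∀ (string : String), Dom_last_page_number string → Spec_last_page_number string (last_page_number string)

-- ===== LEMMAS AND PROOFS =====

-- longest common prefix length
def pvLcp : List Char → List Char → Nat
  | a :: as, b :: bs => if a = b then pvLcp as bs + 1 else 0
  | _, _ => 0

theorem pvLcp_le_length (s r : List Char) : pvLcp s r ≤ s.length := by
  induction s generalizing r with
  | nil => simp [pvLcp]
  | cons a as ih =>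
    cases r with
    | nil => simp [pvLcp]
    | cons b bs =>
      by_cases h : a = b
      · simp [pvLcp, h]; exact ih bs
      · simp [pvLcp, h]

theorem pvLcp_take_eq (s r : List Char) : s.take (pvLcp s r) = r.take (pvLcp s r) := by
  induction s generalizing r with
  | nil => simp [pvLcp]
  | cons a as ih =>
    cases r with
    | nil => simp [pvLcp]
    | cons b bs =>
      by_cases h : a = b
      · simp [pvLcp, h, ih bs]
      · simp [pvLcp, h]

theorem le_pvLcp_of_take_eq (s r : List Char) (k : Nat) (hk : k ≤ s.length)
    (h : s.take k = r.take k) : k ≤ pvLcp s r := by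
  induction k generalizing s r with
  | zero => omega
  | succ m ih =>
    cases s with
    | nil => simp at hk
    | cons a as =>
      cases r with
      | nil => simp at h
      | cons b bs =>
        simp [List.take_succ_cons] at h
        obtain ⟨hab, ht⟩ := h
        simp at hk
        have := ih as bs (by omega) ht
        simp [pvLcp, hab]
        omega

theorem pvScan_eq_lcp (s r : List Char) : ∀ i, pvScan s r i = i + pvLcp (s.drop i) (r.drop i) := by
  intro i
  induction hk : s.length - i using Nat.strong_induction_on generalizing i with
  | _ k ih =>
    rw [pvScan]
    by_cases h : i < s.length ∧ r[i]? = s[i]?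
    · simp [h]
      obtain ⟨hi, hr⟩ := h
      have h2 : r[i]? = some s[i] := by rw [hr, List.getElem?_eq_getElem hi]
      obtain ⟨hri, heq⟩ := List.getElem?_eq_some_iff.mp h2
      have hs : s.drop i = s[i] :: s.drop (i + 1) := List.drop_eq_getElem_cons hi
      have hrd : r.drop i = r[i] :: r.drop (i + 1) := List.drop_eq_getElem_cons hri
      rw [ih (s.length - (i + 1)) (by omega) (i + 1) rfl, hs, hrd, heq]
      simp [pvLcp]
      omega
    · simp [h]
      push_neg at h
      by_cases hi : i < s.length
      · have hr := h hi
        rw [List.getElem?_eq_getElem hi] at hr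
        have hs : s.drop i = s[i] :: s.drop (i + 1) := List.drop_eq_getElem_cons hi
        by_cases hri : i < r.length
        · have hrd : r.drop i = r[i] :: r.drop (i + 1) := List.drop_eq_getElem_cons hri
          rw [List.getElem?_eq_getElem hri] at hr
          have : r[i] ≠ s[i] := by simpa [eq_comm] using hr
          rw [hs, hrd]
          simp [pvLcp]
          intro hc
          exact absurd hc.symm this
        · have hrd : r.drop i = [] := List.drop_eq_nil_of_le (by omega)
          rw [hrd, hs]
          simp [pvLcp]
      · rw [List.drop_eq_nil_of_le (by omega)]
        simp [pvLcp]

-- one-step and stop equations for pvBuild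
theorem pvBuild_step (n : Nat) (page : Int) (ref : List Char) (bnds : List Nat)
    (h : ref.length < n) :
    pvBuild n page ref bnds = pvBuild n (page + 1) (ref ++ PySem.Int.toChars (page + 1))
      (bnds ++ [(ref ++ PySem.Int.toChars (page + 1)).length]) := by
  rw [pvBuild]
  simp [h]

theorem pvBuild_stop (n : Nat) (page : Int) (ref : List Char) (bnds : List Nat)
    (h : ¬ ref.length < n) :
    pvBuild n page ref bnds = (ref, bnds) := by
  rw [pvBuild]
  simp [h]

-- pvBuild: the boundary accumulator is append-only
theorem pvBuild_acc (n : Nat) : ∀ (page : Int) (ref : List Char) (bnds : List Nat),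
    pvBuild n page ref bnds = ((pvBuild n page ref []).1, bnds ++ (pvBuild n page ref []).2) := by
  intro page ref bnds
  induction hk : n - ref.length using Nat.strong_induction_on generalizing page ref bnds with
  | _ k ih =>
    by_cases h : ref.length < n
    · have hL := pv_toChars_len_pos (page + 1)
      rw [pvBuild_step n page ref bnds h, pvBuild_step n page ref [] h]
      rw [ih (n - (ref ++ PySem.Int.toChars (page + 1)).length) (by simp; omega) _ _
            (bnds ++ [(ref ++ PySem.Int.toChars (page + 1)).length]) rfl,
          ih (n - (ref ++ PySem.Int.toChars (page + 1)).length) (by simp; omega) _ _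
            ([] ++ [(ref ++ PySem.Int.toChars (page + 1)).length]) rfl]
      simp
    · rw [pvBuild_stop n page ref bnds h, pvBuild_stop n page ref [] h]
      simp

theorem pvBuild_ref_prefix (n : Nat) : ∀ (page : Int) (ref : List Char),
    ∃ t, (pvBuild n page ref []).1 = ref ++ t := by
  intro page ref
  induction hk : n - ref.length using Nat.strong_induction_on generalizing page ref with
  | _ k ih =>
    by_cases h : ref.length < n
    · have hL := pv_toChars_len_pos (page + 1)
      rw [pvBuild_step n page ref [] h, pvBuild_acc]
      obtain ⟨t, ht⟩ := ih (n - (ref ++ PySem.Int.toChars (page + 1)).length) (by simp; omega)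
        (page + 1) (ref ++ PySem.Int.toChars (page + 1)) rfl
      exact ⟨PySem.Int.toChars (page + 1) ++ t, by simp [ht]⟩
    · rw [pvBuild_stop n page ref [] h]
      exact ⟨[], by simp⟩

theorem pvBuild_bnds_gt (n : Nat) : ∀ (page : Int) (ref : List Char) (b : Nat),
    b ∈ (pvBuild n page ref []).2 → ref.length < b := by
  intro page ref b
  induction hk : n - ref.length using Nat.strong_induction_on generalizing page ref with
  | _ k ih =>
    by_cases h : ref.length < n
    · have hL := pv_toChars_len_pos (page + 1)
      rw [pvBuild_step n page ref [] h, pvBuild_acc]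
      intro hb
      simp at hb
      rcases hb with hb | hb
      · omega
      · have := ih (n - (ref ++ PySem.Int.toChars (page + 1)).length) (by simp; omega)
          (page + 1) (ref ++ PySem.Int.toChars (page + 1)) rfl hb
        simp at this
        omega
    · rw [pvBuild_stop n page ref [] h]
      simp

-- main invariant: from state (pos, page) with ref = the matched prefix of s,
-- A's remaining loop count equals B's count of boundaries inside the matched prefix
theorem pv_main (s : List Char) : ∀ (pos : Nat) (page : Int) (ref : List Char),
    pos ≤ s.length → ref = s.take pos → ref.length = pos →
    lpnLoopA s pos page = page +
      (((pvBuild s.length page ref []).2.countP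
        (fun b => decide (b ≤ pvLcp s (pvBuild s.length page ref []).1)) : Nat) : Int) := by
  intro pos page ref hpos href hlen
  induction hk : s.length - pos using Nat.strong_induction_on generalizing pos page ref with
  | _ k ih =>
    by_cases h : pos < s.length
    · set p := PySem.Int.toChars (page + 1) with hp
      have hL : 0 < p.length := pv_toChars_len_pos (page + 1)
      -- one step of pvBuild
      have hstep : pvBuild s.length page ref [] =
          ((pvBuild s.length (page + 1) (ref ++ p) []).1,
            (pos + p.length) :: (pvBuild s.length (page + 1) (ref ++ p) []).2) := by
        rw [pvBuild_step s.length page ref [] (by rw [hlen]; exact h), pvBuild_acc]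
        simp [hlen, hp]
      rw [lpnLoopA]
      simp only [h, dif_pos]
      have hslice : PySem.List.slice s (some (pos : Int)) (some ((pos : Int) + (p.length : Int)))
          = (s.drop pos).take p.length := PySem.List.slice_natCast_add s pos p.length
      by_cases hm : (s.drop pos).take p.length = p
      · -- match: recurse
        have hle : pos + p.length ≤ s.length := by
          have := congrArg List.length hm
          simp at this
          omega
        have htake : s.take (pos + p.length) = ref ++ p := by
          rw [List.take_add, href, hm]
        have href' : ref ++ p = s.take (pos + p.length) := htake.symm
        have hlen' : (ref ++ p).length = pos + p.length := by simp [hlen]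
        rw [if_pos (by rw [hslice, hm])]
        rw [ih (s.length - (pos + p.length)) (by omega) (pos + p.length) (page + 1)
            (ref ++ p) hle href' hlen' rfl]
        rw [hstep]
        -- the new boundary pos + p.length lies inside the matched prefix
        have hlcp : pos + p.length ≤ pvLcp s (pvBuild s.length (page + 1) (ref ++ p) []).1 := by
          obtain ⟨t, ht⟩ := pvBuild_ref_prefix s.length (page + 1) (ref ++ p)
          apply le_pvLcp_of_take_eq _ _ _ hle
          rw [ht, htake]
          rw [List.take_append_of_le_length (by simp [hlen])]
          simp [hlen]
        simp only [List.countP_cons, decide_eq_true_eq]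
        rw [if_pos hlcp]
        push_cast
        ring
      · -- mismatch: A stops; no boundary lies inside the matched prefix
        rw [if_neg (by rw [hslice]; exact hm)]
        rw [hstep]
        set rT := (pvBuild s.length (page + 1) (ref ++ p) []).1 with hrT
        have hlcp_lt : pvLcp s rT < pos + p.length := by
          by_contra hc
          push_neg at hc
          have hle : pos + p.length ≤ s.length :=
            le_trans hc (pvLcp_le_length s rT)
          obtain ⟨t, ht⟩ := pvBuild_ref_prefix s.length (page + 1) (ref ++ p)
          have hteq := pvLcp_take_eq s rT
          have h1 : s.take (pos + p.length) = rT.take (pos + p.length) := by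
            have h0 := congrArg (List.take (pos + p.length)) hteq
            rw [List.take_take, List.take_take, Nat.min_eq_left hc] at h0
            exact h0
          have h2 : rT.take (pos + p.length) = ref ++ p := by
            rw [← hrT] at ht
            rw [ht, List.take_append_of_le_length (by simp [hlen])]
            have he : pos + p.length = (ref ++ p).length := by simp [hlen]
            rw [he, List.take_length]
          have h3 : s.take (pos + p.length) = ref ++ p := h1.trans h2
          rw [List.take_add, href] at h3
          exact hm (List.append_cancel_left h3)
        rw [List.countP_cons]
        have hhead : ¬ (pos + p.length ≤ pvLcp s rT) := by omega
        simp only [decide_eq_true_eq, if_neg hhead]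
        have hrest : (pvBuild s.length (page + 1) (ref ++ p) []).2.countP
            (fun b => decide (b ≤ pvLcp s rT)) = 0 := by
          rw [List.countP_eq_zero]
          intro b hb
          have := pvBuild_bnds_gt s.length (page + 1) (ref ++ p) b hb
          simp [hlen] at this
          simp
          omega
        rw [hrest]
        simp
    · -- pos = s.length: both loops stop
      rw [lpnLoopA]
      simp only [h, dite_false]
      rw [pvBuild_stop s.length page ref [] (by omega)]
      simp

-- ===== VERDICT (by name: the statement is the Claim_ definition above) =====
theorem last_page_number_spec : Claim_equal_last_page_number := by
  intro string _
  unfold Spec_last_page_number last_page_number last_page_number_alt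
  rw [pv_main string.toList 0 0 [] (by omega) (by simp) rfl]
  simp [pvScan_eq_lcp]
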